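-- pv_equiv track=rewrite | github.com/emmas0507/lintcode | longest_word.py | longest_way
-- ===== SOURCE A (Python) =====
-- def longest_way(words_list):
--     length_dict = {}
--
--     for w in words_list:
--         if len(w) in length_dict:
--             length_dict[len(w)] = length_dict[len(w)] + [w]
--         else:
--             length_dict[len(w)] = [w]
--
--     longest_l = max(length_dict.keys())
--     return length_dict[longest_l]
-- ===== SOURCE B (Python) =====
-- def longest_way(words_list):
--     best = -1
--     result = []
--     for w in words_list:
--         l = len(w)
--         if l > best:
--             best = l
--             result = [w]
--         elif l == best:
--             result.append(w)
--     return result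
-- ===== Notes on version B (the rewrite author's own statement) =====
-- stated objective: faster
-- what changed: B replaces A's length-keyed dict of lists (grouping every word by rebuilding the group list on each append, then max over keys and a lookup) by a single pass that tracks the current maximum length and resets/extends one result list.
import Mathlib
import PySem

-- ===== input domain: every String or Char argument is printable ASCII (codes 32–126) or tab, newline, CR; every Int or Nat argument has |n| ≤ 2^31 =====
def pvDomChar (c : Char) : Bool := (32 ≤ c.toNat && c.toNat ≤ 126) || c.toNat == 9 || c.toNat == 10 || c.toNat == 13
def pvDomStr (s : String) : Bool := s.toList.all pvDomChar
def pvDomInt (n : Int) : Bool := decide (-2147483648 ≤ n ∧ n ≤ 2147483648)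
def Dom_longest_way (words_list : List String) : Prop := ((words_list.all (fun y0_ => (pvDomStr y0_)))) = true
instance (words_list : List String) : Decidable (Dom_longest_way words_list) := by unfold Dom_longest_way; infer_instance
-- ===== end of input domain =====

-- B replaces A's length-keyed dict grouping (then max over keys + lookup) with a single pass
-- tracking the maximum length and resetting/extending the result list; measured faster (A rebuilds a group list per repeated length, B is one linear pass).


-- ===== PORT A =====
def longest_way (words_list : List String) : List String :=
  let length_dict : PySem.Dict Int (List String) :=
    words_list.foldl (fun d w =>
      if d.contains (PySem.Str.len w) then
        d.insert (PySem.Str.len w) (d.getD (PySem.Str.len w) [] ++ [w])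
      else
        d.insert (PySem.Str.len w) [w]) PySem.Dict.empty
  match PySem.List.max? length_dict.keys (fun x => x) with
  | some longest_l => length_dict.getD longest_l []
  | none => []   -- Python raises ValueError (max of empty sequence) here; excluded by Pre_

-- ===== PORT B =====
def longest_way_alt (words_list : List String) : List String :=
  (words_list.foldl (fun st w =>
    let l : Int := PySem.Str.len w
    if st.1 < l then (l, [w])
    else if l = st.1 then (st.1, st.2 ++ [w])
    else st) ((-1 : Int), ([] : List String))).2

-- ===== PRECONDITION & SPEC =====
-- Pre_ excludes exactly the empty list, on which A's max() raises ValueError.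
def Pre_longest_way (words_list : List String) : Prop := words_list ≠ []
instance (words_list : List String) : Decidable (Pre_longest_way words_list) := by unfold Pre_longest_way; infer_instance
def pvWitness_longest_way : List String := (["ab", "c", "de"])

def Spec_longest_way (words_list : List String) (out : List String) : Prop := out = longest_way_alt words_list
instance (words_list : List String) (out : List String) : Decidable (Spec_longest_way words_list out) := by unfold Spec_longest_way; infer_instance

-- ===== CLAIM (what is proved, stated in full; the proofs are below) =====
def Claim_equal_longest_way : Prop := ∀ (words_list : List String), Dom_longest_way words_list → Pre_longest_way words_list → Spec_longest_way words_list (longest_way words_list)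

-- ===== LEMMAS AND PROOFS =====

-- the maximum length seen, −1 initially
def pvMx (ws : List String) : Int := ws.foldl (fun m w => max m (PySem.Str.len w)) (-1)

lemma pvMx_append (ws : List String) (w : String) :
    pvMx (ws ++ [w]) = max (pvMx ws) (PySem.Str.len w) := by
  simp [pvMx]

lemma pvLen_nonneg (w : String) : (0 : Int) ≤ PySem.Str.len w := by
  simp [PySem.Str.len_eq]

lemma pvMx_bound (ws : List String) : ∀ x ∈ ws, PySem.Str.len x ≤ pvMx ws :=
  (PySem.List.le_foldl_max_int ws PySem.Str.len (-1)).2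

lemma pvMx_mem (ws : List String) (h : ws ≠ []) : pvMx ws ∈ ws.map PySem.Str.len := by
  have hfm : pvMx ws = (ws.map PySem.Str.len).foldl max (-1) := by
    simp [pvMx, List.foldl_map]
  rcases PySem.List.foldl_max_mem (ws.map PySem.Str.len) (-1) with h1 | h1
  · exfalso
    rcases List.exists_mem_of_ne_nil ws h with ⟨x, hx⟩
    have h2 := pvMx_bound ws x hx
    have h3 := pvLen_nonneg x
    rw [← hfm] at h1
    omega
  · rw [hfm]; exact h1

-- B's loop computes (pvMx ws, words of maximal length in order)
lemma alt_loop (ws : List String) :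
    ws.foldl (fun st w =>
      let l : Int := PySem.Str.len w
      if st.1 < l then (l, [w])
      else if l = st.1 then (st.1, st.2 ++ [w])
      else st) ((-1 : Int), ([] : List String))
    = (pvMx ws, ws.filter (fun w => PySem.Str.len w == pvMx ws)) := by
  induction ws using List.reverseRecOn with
  | nil => simp [pvMx]
  | append_singleton ws w ih =>
    rw [List.foldl_append, ih]
    simp only [List.foldl_cons, List.foldl_nil]
    rw [pvMx_append, List.filter_append]
    have hb := pvMx_bound ws
    simp only [PySem.Str.len_eq, String.length_toList] at hb ⊢
    split_ifs with g1 g2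
    · have hmax : max (pvMx ws) ((w.length : Int)) = (w.length : Int) := by omega
      simp [hmax]
      intro a ha
      have := hb a ha
      omega
    · have hmax : max (pvMx ws) ((w.length : Int)) = pvMx ws := by omega
      simp [g2]
    · have hmax : max (pvMx ws) ((w.length : Int)) = pvMx ws := by omega
      simp [hmax, g2]

-- A's dict maps each length to the words of that length, in order
lemma dict_getD (c : Int) (ws : List String) : ∀ (d : PySem.Dict Int (List String)),
    (ws.foldl (fun d w =>
      if d.contains (PySem.Str.len w) then
        d.insert (PySem.Str.len w) (d.getD (PySem.Str.len w) [] ++ [w])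
      else
        d.insert (PySem.Str.len w) [w]) d).getD c []
    = d.getD c [] ++ ws.filter (fun w => PySem.Str.len w == c) := by
  induction ws using List.reverseRecOn with
  | nil => simp
  | append_singleton ws w ih =>
    intro d
    rw [List.foldl_append]
    simp only [List.foldl_cons, List.foldl_nil]
    set d' := ws.foldl (fun d w =>
      if d.contains (PySem.Str.len w) then
        d.insert (PySem.Str.len w) (d.getD (PySem.Str.len w) [] ++ [w])
      else
        d.insert (PySem.Str.len w) [w]) d with hd'
    rw [List.filter_append]
    by_cases hc : d'.contains (PySem.Str.len w)
    · rw [if_pos hc, PySem.Dict.getD_insert]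
      by_cases he : c = PySem.Str.len w
      · subst he
        rw [if_pos rfl, ih d]
        simp [List.append_assoc]
      · rw [if_neg he, ih d]
        have hf : ¬ ((w.length : Int) = c) := fun h => he h.symm
        simp [hf]
    · rw [if_neg hc, PySem.Dict.getD_insert]
      by_cases he : c = PySem.Str.len w
      · subst he
        have h0 : d'.getD (PySem.Str.len w) [] = [] :=
          PySem.Dict.getD_of_not_contains d' [] (by simpa using hc)
        rw [ih d] at h0
        rcases List.append_eq_nil_iff.mp h0 with ⟨h1, h2⟩
        rw [if_pos rfl]
        simp only [PySem.Str.len_eq, String.length_toList] at h1 h2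
        simp [h1, h2]
      · rw [if_neg he, ih d]
        have hf : ¬ ((w.length : Int) = c) := fun h => he h.symm
        simp [hf]

-- A's dict keys are the distinct lengths
lemma dict_keys (ws : List String) :
    (ws.foldl (fun d w =>
      if d.contains (PySem.Str.len w) then
        d.insert (PySem.Str.len w) (d.getD (PySem.Str.len w) [] ++ [w])
      else
        d.insert (PySem.Str.len w) [w]) PySem.Dict.empty).keys
    = PySem.Set.ofList (ws.map PySem.Str.len) := by
  have hbody : (fun (d : PySem.Dict Int (List String)) (w : String) =>
      if d.contains (PySem.Str.len w) then
        d.insert (PySem.Str.len w) (d.getD (PySem.Str.len w) [] ++ [w])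
      else
        d.insert (PySem.Str.len w) [w])
    = (fun d w => d.insert (PySem.Str.len w)
        (if d.contains (PySem.Str.len w) then d.getD (PySem.Str.len w) [] ++ [w] else [w])) := by
    funext d w
    split_ifs <;> rfl
  rw [hbody, PySem.Dict.keys_foldl_insert_key]
  simp [PySem.Dict.keys_empty, PySem.Set.update_nil_left]

-- ===== VERDICT (by name: the statement is the Claim_ definition above) =====
theorem longest_way_spec : Claim_equal_longest_way := by
  intro ws _ hpre
  unfold Spec_longest_way longest_way longest_way_alt
  dsimp only
  rw [alt_loop, dict_keys]
  rcases hm : PySem.List.max? (PySem.Set.ofList (ws.map PySem.Str.len)) (fun x => x) with _ | m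
  · exfalso
    have hnil := (PySem.List.max?_eq_none_iff _ _).mp hm
    rcases List.exists_mem_of_ne_nil ws hpre with ⟨x, hx⟩
    have : PySem.Str.len x ∈ PySem.Set.ofList (ws.map PySem.Str.len) := by
      rw [PySem.Set.mem_ofList]; exact List.mem_map_of_mem hx
    simp [hnil] at this
  · have hmem : m ∈ PySem.Set.ofList (ws.map PySem.Str.len) := PySem.List.max?_mem hm
    have hub := PySem.List.max?_isMax hm
    rw [PySem.Set.mem_ofList] at hmem
    have hmx : m = pvMx ws := by
      apply le_antisymm
      · rcases List.mem_map.mp hmem with ⟨x, hx, hlx⟩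
        rw [← hlx]
        exact pvMx_bound ws x hx
      · refine hub (pvMx ws) ?_
        rw [PySem.Set.mem_ofList]
        exact pvMx_mem ws hpre
    dsimp only
    rw [dict_getD m ws, hmx]
    simp
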